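-- pv_equiv track=rewrite | github.com/ariecattan/SciCo | utils/conll.py | get_surrounding_context
-- ===== SOURCE A (Python) =====
-- def get_surrounding_context(doc_sentences):
--     context = [[x - 1, x + 1] for x in doc_sentences]
--
--     starts, ends = [], []
--     starts.append(context[0][0])
--     i = 1
--
--     while i < len(doc_sentences):
--         if context[i][0] > context[i - 1][1] + 2:
--             ends.append(context[i - 1][1])
--             starts.append(context[i][0])
--         i += 1
--     ends.append(context[-1][1])
--
--     return list(zip(starts, ends))
-- ===== SOURCE B (Python) =====
-- def get_surrounding_context(doc_sentences):
--     if len(doc_sentences) <= 1: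
--         return [(x - 1, x + 1) for x in doc_sentences]
--     mid = len(doc_sentences) // 2
--     left = get_surrounding_context(doc_sentences[:mid])
--     right = get_surrounding_context(doc_sentences[mid:])
--     if doc_sentences[mid] > doc_sentences[mid - 1] + 4:
--         return left + right
--     return left[:-1] + [(left[-1][0], right[0][1])] + right[1:]
-- ===== Notes on version B (the rewrite author's own statement) =====
-- stated objective: alternative
-- what changed: Replaces A's single left-to-right while-loop with parallel starts/ends accumulators by a divide-and-conquer recursion: split the list at the midpoint, recursively build the interval lists of each half, and merge them at the boundary (concatenate if the midpoint gap exceeds 4, otherwise fuse the last left interval with the first right one).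
import Mathlib
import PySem

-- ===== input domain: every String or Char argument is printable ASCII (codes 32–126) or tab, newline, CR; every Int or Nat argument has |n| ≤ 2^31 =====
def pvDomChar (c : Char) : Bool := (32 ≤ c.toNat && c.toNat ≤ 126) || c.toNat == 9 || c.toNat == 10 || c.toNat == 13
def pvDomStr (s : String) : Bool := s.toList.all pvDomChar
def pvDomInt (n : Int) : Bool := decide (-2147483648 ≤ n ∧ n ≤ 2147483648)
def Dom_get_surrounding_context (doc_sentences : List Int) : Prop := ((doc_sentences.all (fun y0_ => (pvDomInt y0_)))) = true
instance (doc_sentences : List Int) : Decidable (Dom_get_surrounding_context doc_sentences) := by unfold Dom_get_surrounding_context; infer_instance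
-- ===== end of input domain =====

-- B builds the intervals by divide-and-conquer (split at the midpoint, recurse, merge at the
-- boundary) instead of A's single while-loop with parallel starts/ends accumulators; objective:
-- a genuinely different algorithm of similar cost.

-- ===== PORT A =====
-- the while-loop of A: i runs from 1 to len-1, appending to starts/ends on a gap
def gscA_loop (context : List (Int × Int)) (n : Nat) (starts ends : List Int) (i : Nat) :
    List Int × List Int :=
  if i < n then
    let ci := PySem.List.pyGetD context ((i : Int)) (0, 0)
    let cp := PySem.List.pyGetD context ((i : Int) - 1) (0, 0)
    if ci.1 > cp.2 + 2 then
      gscA_loop context n (starts ++ [ci.1]) (ends ++ [cp.2]) (i + 1)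
    else
      gscA_loop context n starts ends (i + 1)
  else (starts, ends)
termination_by n - i

-- context[0][0] raises IndexError on the empty list in Python; Pre_ excludes it, default unused there
def get_surrounding_context (doc_sentences : List Int) : List (Int × Int) :=
  let context := doc_sentences.map (fun x => (x - 1, x + 1))
  let se := gscA_loop context doc_sentences.length [(PySem.List.pyGetD context 0 (0, 0)).1] [] 1
  let ends := se.2 ++ [(PySem.List.pyGetD context (-1) (0, 0)).2]
  se.1.zip ends

-- ===== PORT B =====
-- divide and conquer: doc_sentences[:mid] / doc_sentences[mid:] are PySem slices; left[-1] and
-- right[0] are in range because both halves are nonempty when length ≥ 2, so pyGetD's default is unused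
-- fuel = length is only a structural-termination guard; the algorithm is Source B's divide-and-conquer
def gscB_go (fuel : Nat) (l : List Int) : List (Int × Int) :=
  match fuel with
  | 0 => l.map (fun x => (x - 1, x + 1))
  | fuel + 1 =>
    if l.length ≤ 1 then
      l.map (fun x => (x - 1, x + 1))
    else
      let mid : Nat := l.length / 2
      let left := gscB_go fuel (PySem.List.slice l none (some (mid : Int)))
      let right := gscB_go fuel (PySem.List.slice l (some (mid : Int)) none)
      if PySem.List.pyGetD l ((mid : Int)) 0 >
          PySem.List.pyGetD l ((mid : Int) - 1) 0 + 4 then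
        left ++ right
      else
        PySem.List.slice left none (some (-1)) ++
          [((PySem.List.pyGetD left (-1) ((0 : Int), (0 : Int))).1,
            (PySem.List.pyGetD right 0 ((0 : Int), (0 : Int))).2)] ++
          PySem.List.slice right (some 1) none

-- left[-1] and right[0] are in range because both halves are nonempty when length ≥ 2,
-- so pyGetD's default is unused; doc_sentences[:mid] / doc_sentences[mid:] are PySem slices
def get_surrounding_context_alt (doc_sentences : List Int) : List (Int × Int) :=
  gscB_go doc_sentences.length doc_sentences

-- ===== PRECONDITION & SPEC =====
-- Pre_ excludes only the empty list, on which Python A raises IndexError.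
def Pre_get_surrounding_context (doc_sentences : List Int) : Prop := doc_sentences ≠ []
instance (doc_sentences : List Int) : Decidable (Pre_get_surrounding_context doc_sentences) := by
  unfold Pre_get_surrounding_context; infer_instance

def pvWitness_get_surrounding_context : List Int := [2, 3, 10]

def Spec_get_surrounding_context (doc_sentences : List Int) (out : List (Int × Int)) : Prop :=
  out = get_surrounding_context_alt doc_sentences
instance (doc_sentences : List Int) (out : List (Int × Int)) :
    Decidable (Spec_get_surrounding_context doc_sentences out) := by
  unfold Spec_get_surrounding_context; infer_instance

-- ===== CLAIM (what is proved, stated in full; the proofs are below) =====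
def Claim_equal_get_surrounding_context : Prop := ∀ (doc_sentences : List Int), Dom_get_surrounding_context doc_sentences → Pre_get_surrounding_context doc_sentences → Spec_get_surrounding_context doc_sentences (get_surrounding_context doc_sentences)

-- ===== LEMMAS AND PROOFS =====

-- common reference recursion: G cur prev rest = the remaining intervals, given the already-started
-- group's left endpoint cur (= start value - 1) and the previous sentence value prev
def gscG (cur prev : Int) : List Int → List (Int × Int)
  | [] => [(cur, prev + 1)]
  | y :: ys => if prev + 4 < y then (cur, prev + 1) :: gscG (y - 1) y ys else gscG cur y ys

def gscAll : List Int → List (Int × Int)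
  | [] => []
  | x :: xs => gscG (x - 1) x xs

theorem gscG_ne_nil (cur prev : Int) (xs : List Int) : gscG cur prev xs ≠ [] := by
  induction xs generalizing cur prev with
  | nil => simp [gscG]
  | cons y ys ih => rw [gscG]; split_ifs <;> simp [ih]

-- the result's first interval carries cur as its start; its end and the tail do not depend on cur
theorem gscG_shape (prev : Int) (xs : List Int) :
    ∃ e rest, ∀ cur, gscG cur prev xs = (cur, e) :: rest := by
  induction xs generalizing prev with
  | nil => exact ⟨prev + 1, [], fun cur => rfl⟩
  | cons y ys ih =>
    by_cases h : prev + 4 < y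
    · exact ⟨prev + 1, gscG (y - 1) y ys, fun cur => by rw [gscG, if_pos h]⟩
    · obtain ⟨e, rest, he⟩ := ih y
      exact ⟨e, rest, fun cur => by rw [gscG, if_neg h, he]⟩

-- last element of prev :: xs
def gscLast (prev : Int) : List Int → Int
  | [] => prev
  | x :: xs => gscLast x xs

theorem gscLast_some (prev : Int) (xs : List Int) :
    (prev :: xs).getLast? = some (gscLast prev xs) := by
  induction xs generalizing prev with
  | nil => rfl
  | cons x xs ih => rw [gscLast, List.getLast?_cons_cons, ih]

-- the merge identity the divide-and-conquer step relies on
theorem gscG_append (xs : List Int) (cur prev y : Int) (ys : List Int) :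
    gscG cur prev (xs ++ y :: ys) =
      if gscLast prev xs + 4 < y then
        gscG cur prev xs ++ gscG (y - 1) y ys
      else
        (gscG cur prev xs).dropLast ++
          (((gscG cur prev xs).getLast?.getD (0, 0)).1,
           ((gscG (y - 1) y ys).head?.getD (0, 0)).2) :: (gscG (y - 1) y ys).tail := by
  induction xs generalizing cur prev with
  | nil =>
    simp only [List.nil_append, gscLast, gscG]
    by_cases h : prev + 4 < y
    · rw [if_pos h, if_pos h]; rfl
    · rw [if_neg h, if_neg h]
      obtain ⟨e, rest, he⟩ := gscG_shape y ys
      rw [he cur, he (y - 1)]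
      rfl
  | cons x xs ih =>
    simp only [List.cons_append, gscLast]
    rw [gscG, gscG]
    by_cases h : prev + 4 < x
    · rw [if_pos h, if_pos h, ih]
      by_cases h2 : gscLast x xs + 4 < y
      · rw [if_pos h2, if_pos h2, List.cons_append]
      · rw [if_neg h2, if_neg h2]
        obtain ⟨z, zs, hz⟩ := List.exists_cons_of_ne_nil (gscG_ne_nil (x - 1) x xs)
        rw [hz, List.dropLast_cons₂, List.getLast?_cons_cons]
        rfl
    · rw [if_neg h, if_neg h, ih]
      rfl

-- B computes gscAll on every nonempty list
theorem alt_go_eq_gscAll : ∀ (n : Nat) (l : List Int), l.length ≤ n → l ≠ [] →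
    gscB_go n l = gscAll l := by
  intro n
  induction n with
  | zero => intro l hl hne; cases l with
    | nil => exact absurd rfl hne
    | cons x xs => simp at hl
  | succ n ih =>
    intro l hl hne
    obtain ⟨x, t, rfl⟩ : ∃ x t, l = x :: t := by
      cases l with
      | nil => exact absurd rfl hne
      | cons x xs => exact ⟨x, xs, rfl⟩
    rw [gscB_go]
    by_cases h1 : (x :: t).length ≤ 1
    · rw [if_pos h1]
      cases t with
      | nil => rfl
      | cons y ys => simp at h1
    · rw [if_neg h1]
      have hlen : 2 ≤ (x :: t).length := by omega
      simp only []
      set l : List Int := x :: t with hldef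
      set mid : Nat := l.length / 2 with hmid
      have hlen' : 2 ≤ l.length := hlen
      have hmid1 : 1 ≤ mid := by omega
      have hmidlt : mid < l.length := by omega
      rw [PySem.List.slice_to_natCast, PySem.List.slice_from_natCast]
      have hlt : (l.take mid).length = mid := by
        rw [List.length_take]; omega
      have hld : (l.drop mid).length = l.length - mid := by
        rw [List.length_drop]
      have htake_ne : l.take mid ≠ [] := by
        intro hc; rw [hc] at hlt; simp at hlt; omega
      have hdrop_ne : l.drop mid ≠ [] := by
        intro hc; rw [hc] at hld; simp at hld; omega
      have hLt : (l.take mid).length ≤ n := by omega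
      have hRt : (l.drop mid).length ≤ n := by omega
      rw [ih _ hLt htake_ne, ih _ hRt hdrop_ne]
      have hmid_lt' : mid < l.length := hmidlt
      have hdrop : l.drop mid = l[mid] :: l.drop (mid + 1) := List.drop_eq_getElem_cons hmid_lt'
      have htake : l.take mid = x :: t.take (mid - 1) := by
        rw [hldef]
        cases hm : mid with
        | zero => omega
        | succ m => simp [List.take_succ_cons]
      have hgi : PySem.List.pyGetD l ((mid : Int)) 0 = l[mid] := by
        rw [PySem.List.pyGetD_natCast, List.getD_eq_getElem?_getD, List.getElem?_eq_getElem hmid_lt']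
        rfl
      have hmid0 : mid - 1 < l.length := by omega
      have hgp : PySem.List.pyGetD l ((mid : Int) - 1) 0 = l[mid - 1] := by
        rw [show ((mid : Int) - 1) = (((mid - 1 : Nat) : Nat) : Int) by omega,
          PySem.List.pyGetD_natCast, List.getD_eq_getElem?_getD, List.getElem?_eq_getElem hmid0]
        rfl
      have hlast : gscLast x (t.take (mid - 1)) = l[mid - 1] := by
        have h4 : (l.take mid).getLast? = some (gscLast x (t.take (mid - 1))) := by
          rw [htake, gscLast_some]
        have h5 : (l.take mid).getLast? = some l[mid - 1] := by
          rw [List.getLast?_eq_getElem?, hlt, List.getElem?_take_of_lt (by omega),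
            List.getElem?_eq_getElem hmid0]
        rw [h4] at h5
        exact Option.some_inj.mp h5
      have hsplit : t = t.take (mid - 1) ++ l[mid] :: l.drop (mid + 1) := by
        have h6 : t = l.drop 1 := rfl
        calc t = l.drop 1 := h6
        _ = (l.take mid).drop 1 ++ l.drop mid := by
              rw [← List.drop_append_of_le_length (by omega)]
              congr 1
              exact (List.take_append_drop mid l).symm
        _ = t.take (mid - 1) ++ l.drop mid := by rw [htake]; rfl
        _ = t.take (mid - 1) ++ l[mid] :: l.drop (mid + 1) := by rw [hdrop]
      have hAll : gscAll l = gscG (x - 1) x (t.take (mid - 1) ++ l[mid] :: l.drop (mid + 1)) := by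
        have h7 : gscAll l = gscG (x - 1) x t := by rw [hldef]; rfl
        rw [h7]
        exact congrArg _ hsplit
      rw [hAll, gscG_append, hlast, htake, hdrop, hgi, hgp]
      simp only [gscAll]
      by_cases hc : l[mid - 1] + 4 < l[mid]
      · rw [if_pos (by omega), if_pos hc]
      · rw [if_neg (by omega), if_neg hc]
        have hLne := gscG_ne_nil (x - 1) x (t.take (mid - 1))
        have hRne := gscG_ne_nil (l[mid] - 1) l[mid] (l.drop (mid + 1))
        rw [PySem.List.slice_to_neg_one, PySem.List.slice_from_one,
          PySem.List.pyGetD_neg_one (h := hLne), PySem.List.pyGetD_zero,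
          List.getLast?_eq_getLast_of_ne_nil hLne]
        obtain ⟨r, rs, hr⟩ := List.exists_cons_of_ne_nil hRne
        rw [hr]
        simp

-- A computes gscAll on every nonempty list (via the loop invariant below)
theorem gscA_loop_spec (l : List Int) :
    ∀ (k i : Nat) (ds de : List Int) (cur : Int),
      1 ≤ i → l.length = i + k → ds.length = de.length →
      (gscA_loop (l.map (fun x => (x - 1, x + 1))) l.length (ds ++ [cur]) de i).1.zip
        ((gscA_loop (l.map (fun x => (x - 1, x + 1))) l.length (ds ++ [cur]) de i).2 ++
          [l.getD (l.length - 1) 0 + 1]) =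
      ds.zip de ++ gscG cur (l.getD (i - 1) 0) (l.drop i) := by
  intro k
  induction k with
  | zero =>
    intro i ds de cur hi hn hlen
    rw [gscA_loop]
    simp only [Nat.add_zero] at hn
    rw [if_neg (by omega)]
    have hdrop : l.drop i = [] := List.drop_eq_nil_of_le (by omega)
    rw [hdrop, gscG]
    rw [List.zip_append (by simp [hlen])]
    simp only [List.zip_cons_cons, List.zip_nil_right]
    rw [show i - 1 = l.length - 1 by omega]
  | succ k ih =>
    intro i ds de cur hi hn hlen
    rw [gscA_loop]
    rw [if_pos (by omega)]
    have hi1 : i < l.length := by omega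
    have hi0 : i - 1 < l.length := by omega
    have hci : PySem.List.pyGetD (l.map (fun x => (x - 1, x + 1))) ((i : Int)) ((0 : Int), (0 : Int))
        = (l.getD i 0 - 1, l.getD i 0 + 1) := by
      rw [show ((i : Int)) = ((i : Nat) : Int) from rfl, PySem.List.pyGetD_natCast]
      rw [List.getD_eq_getElem?_getD, List.getD_eq_getElem?_getD]
      simp [List.getElem?_eq_getElem hi1, List.getElem?_eq_getElem (by simpa using hi1 : i < (l.map (fun x => (x - 1, x + 1))).length)]
    have hcp : PySem.List.pyGetD (l.map (fun x => (x - 1, x + 1))) ((i : Int) - 1) ((0 : Int), (0 : Int))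
        = (l.getD (i - 1) 0 - 1, l.getD (i - 1) 0 + 1) := by
      rw [show ((i : Int) - 1) = (((i - 1 : Nat) : Nat) : Int) by omega, PySem.List.pyGetD_natCast]
      rw [List.getD_eq_getElem?_getD, List.getD_eq_getElem?_getD]
      simp [List.getElem?_eq_getElem hi0, List.getElem?_eq_getElem (by simpa using hi0 : i - 1 < (l.map (fun x => (x - 1, x + 1))).length)]
    rw [hci, hcp]
    have hdrop : l.drop i = l.getD i 0 :: l.drop (i + 1) := by
      rw [List.getD_eq_getElem?_getD, List.getElem?_eq_getElem hi1]
      simpa using (List.drop_eq_getElem_cons hi1)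
    by_cases hc : l.getD (i - 1) 0 + 4 < l.getD i 0
    · rw [if_pos (by simpa using (by omega : l.getD (i - 1) 0 + 1 + 2 < l.getD i 0 - 1))]
      rw [show ds ++ [cur] ++ [l.getD i 0 - 1] = (ds ++ [cur]) ++ [l.getD i 0 - 1] from rfl]
      rw [ih (i + 1) (ds ++ [cur]) (de ++ [l.getD (i - 1) 0 + 1]) (l.getD i 0 - 1)
        (by omega) (by omega) (by simp [hlen])]
      rw [hdrop, gscG, if_pos hc]
      rw [List.zip_append (by simp [hlen])]
      simp
    · rw [if_neg (by simpa using (by omega : ¬ (l.getD (i - 1) 0 + 1 + 2 < l.getD i 0 - 1)))]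
      rw [ih (i + 1) ds de cur (by omega) (by omega) hlen]
      rw [hdrop, gscG, if_neg hc]
      simp

theorem A_eq_gscAll (x : Int) (xs : List Int) :
    get_surrounding_context (x :: xs) = gscG (x - 1) x xs := by
  unfold get_surrounding_context
  simp only [List.map_cons, PySem.List.pyGetD_zero_cons]
  rw [show ((x - 1, x + 1) :: xs.map (fun x => (x - 1, x + 1)))
      = (x :: xs).map (fun x => (x - 1, x + 1)) from rfl]
  have hlast : PySem.List.pyGetD ((x :: xs).map (fun x => (x - 1, x + 1))) (-1)
      ((0 : Int), (0 : Int)) = ((x :: xs).getD ((x :: xs).length - 1) 0 - 1,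
        (x :: xs).getD ((x :: xs).length - 1) 0 + 1) := by
    rw [PySem.List.pyGetD_neg_ofNat _ 1 _ (by omega) (by simp)]
    rw [List.getElem_map]
    rw [List.getD_eq_getElem _ _ (by simp)]
    simp
  rw [hlast]
  have hA := gscA_loop_spec (x :: xs) xs.length 1 [] [] (x - 1) (le_refl 1)
    (by simp [Nat.add_comm]) rfl
  simp only [List.nil_append, List.zip_nil_right] at hA
  rw [hA]
  simp

-- ===== VERDICT (by name: the statements are the Claim_ definitions above) =====
theorem get_surrounding_context_spec : Claim_equal_get_surrounding_context := by
  intro l _ hne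
  unfold Spec_get_surrounding_context
  obtain ⟨x, xs, rfl⟩ : ∃ x xs, l = x :: xs := by
    cases l with
    | nil => exact absurd rfl hne
    | cons x xs => exact ⟨x, xs, rfl⟩
  rw [A_eq_gscAll]
  unfold get_surrounding_context_alt
  rw [alt_go_eq_gscAll _ _ le_rfl (by simp)]
  rfl
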